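-- pv_equiv track=rewrite | github.com/IceCreamWW/ESPnet-informed-se | espnet2/text/utils.py | ali2ctm
-- ===== SOURCE A (Python) =====
-- def ali2ctm(ali, sil=1):
--     ctm = []
--     phn = sil
--     idx = 0
--     for i, e in enumerate(ali):
--         if e != phn:
--             if phn != sil:
--                 ctm.append((phn, idx, i))
--             phn = e
--             idx = i
--     ctm.append((phn, idx, i))
--     return ctm
-- ===== SOURCE B (Python) =====
-- def ali2ctm(ali, sil=1):
--     # Pass 1: run table of (value, start_index) for each maximal run,
--     # seeded with a virtual silence run starting at 0.
--     runs = [(sil, 0)]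
--     for i, e in enumerate(ali):
--         if e != runs[-1][0]:
--             runs.append((e, i))
--     # Pass 2: each run except the last ends where the next begins; emit it
--     # unless it is silence.  The last run is always emitted, ending at the
--     # last frame index.
--     ctm = [(v, s, ns) for (v, s), (_, ns) in zip(runs, runs[1:]) if v != sil]
--     ctm.append((runs[-1][0], runs[-1][1], len(ali) - 1))
--     return ctm
-- ===== Notes on version B (the rewrite author's own statement) =====
-- stated objective: alternative
-- what changed: Replaces A's single incremental loop that mutates (phn, idx) and appends segments on the fly with a two-pass decomposition: pass 1 builds a run table (value, start_index), pass 2 emits non-silence segments by zipping consecutive runs and always emits the last run ending at the final frame index.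
import Mathlib
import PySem

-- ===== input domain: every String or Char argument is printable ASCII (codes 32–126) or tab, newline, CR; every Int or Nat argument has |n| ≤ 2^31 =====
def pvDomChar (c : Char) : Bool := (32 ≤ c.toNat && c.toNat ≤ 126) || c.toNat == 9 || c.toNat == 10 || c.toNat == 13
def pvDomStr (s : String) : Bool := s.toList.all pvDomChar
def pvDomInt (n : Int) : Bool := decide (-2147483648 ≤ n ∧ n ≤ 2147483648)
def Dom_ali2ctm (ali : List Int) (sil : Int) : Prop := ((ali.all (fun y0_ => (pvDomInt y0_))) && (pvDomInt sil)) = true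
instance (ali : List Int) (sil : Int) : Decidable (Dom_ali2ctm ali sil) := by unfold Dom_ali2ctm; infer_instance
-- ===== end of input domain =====

-- B is an alternative two-pass decomposition (run table, then emission) of A's
-- one-pass incremental loop; same O(n) cost, proved equal on nonempty input.

-- ===== PORT A =====
-- A's loop: state (ctm, phn, idx); after a loop that ran (Pre_ guarantees it),
-- Python's i equals len(ali) - 1.
def ali2ctm (ali : List Int) (sil : Int) : List (Int × Int × Int) :=
  let st := (PySem.List.enumerate ali).foldl
    (fun (st : List (Int × Int × Int) × Int × Int) (p : Int × Int) =>
      if p.2 ≠ st.2.1 then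
        ((if st.2.1 ≠ sil then st.1 ++ [(st.2.1, st.2.2, p.1)] else st.1),
         p.2, p.1)
      else st)
    ([], sil, 0)
  st.1 ++ [(st.2.1, st.2.2, (ali.length : Int) - 1)]

-- ===== PORT B =====
-- B-side helper: Source B's pass-2 comprehension over zip(runs, runs[1:]).
def pvEmitPairs (sil : Int) (runs : List (Int × Int)) : List (Int × Int × Int) :=
  ((runs.zip runs.tail).filter (fun q => q.1.1 ≠ sil)).map
    (fun q => (q.1.1, q.1.2, q.2.2))

-- Source B's run list is grown by appending; ported as the usual cons-then-reverse
-- accumulation (runsRev.headI is Source B's runs[-1]).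
def ali2ctm_alt (ali : List Int) (sil : Int) : List (Int × Int × Int) :=
  let runsRev := (PySem.List.enumerate ali).foldl
    (fun (rs : List (Int × Int)) (p : Int × Int) =>
      if p.2 ≠ rs.headI.1 then (p.2, p.1) :: rs else rs)
    [(sil, 0)]
  pvEmitPairs sil runsRev.reverse
    ++ [(runsRev.headI.1, runsRev.headI.2, (ali.length : Int) - 1)]

-- ===== PRECONDITION & SPEC =====
-- Pre_ excludes only the empty list, on which Python A raises UnboundLocalError
-- (the loop variable i is referenced after a loop that never ran).
def Pre_ali2ctm (ali : List Int) (sil : Int) : Prop := ali ≠ []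
instance (ali : List Int) (sil : Int) : Decidable (Pre_ali2ctm ali sil) := by unfold Pre_ali2ctm; infer_instance
def pvWitness_ali2ctm : List Int × Int := ([3, 3, 1, 2], 1)

def Spec_ali2ctm (ali : List Int) (sil : Int) (out : List (Int × Int × Int)) : Prop := out = ali2ctm_alt ali sil
instance (ali : List Int) (sil : Int) (out : List (Int × Int × Int)) : Decidable (Spec_ali2ctm ali sil out) := by unfold Spec_ali2ctm; infer_instance

-- ===== CLAIM (what is proved, stated in full; the proofs are below) =====
def Claim_equal_ali2ctm : Prop := ∀ (ali : List Int) (sil : Int), Dom_ali2ctm ali sil → Pre_ali2ctm ali sil → Spec_ali2ctm ali sil (ali2ctm ali sil)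

-- ===== LEMMAS AND PROOFS =====

theorem pvEmitPairs_cons_cons (sil : Int) (a b : Int × Int) (t : List (Int × Int)) :
    pvEmitPairs sil (a :: b :: t) =
      (if a.1 ≠ sil then [(a.1, a.2, b.2)] else []) ++ pvEmitPairs sil (b :: t) := by
  simp only [pvEmitPairs, List.zip_cons_cons, List.tail_cons, List.filter_cons]
  split_ifs with h <;> simp_all

-- Appending one run extends the emitted pair list by at most one segment,
-- ending at the new run's start.
theorem pvEmitPairs_append (sil : Int) (runs : List (Int × Int)) (h : runs ≠ [])
    (x : Int × Int) :
    pvEmitPairs sil (runs ++ [x]) =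
      pvEmitPairs sil runs ++
        (if (runs.getLast h).1 ≠ sil then
          [((runs.getLast h).1, (runs.getLast h).2, x.2)] else []) := by
  induction runs with
  | nil => exact absurd rfl h
  | cons a t ih =>
    cases t with
    | nil =>
      simp only [List.cons_append, List.nil_append, pvEmitPairs_cons_cons,
        List.getLast_singleton]
      simp [pvEmitPairs]
    | cons b t' =>
      have hgl : ((a :: b :: t').getLast h) = ((b :: t').getLast (by simp)) := by
        simp [List.getLast]
      rw [List.cons_append, List.cons_append, pvEmitPairs_cons_cons,
        pvEmitPairs_cons_cons, ← List.cons_append, ih (by simp), hgl,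
        List.append_assoc]

-- Invariant of the two folds: A's state (ctm, phn, idx) corresponds to B's
-- reversed run list rs via ctm = pvEmitPairs sil rs.reverse and
-- (phn, idx) = rs.headI.
theorem pvFold_inv (sil : Int) (l : List (Int × Int)) :
    ∀ (rs : List (Int × Int)), rs ≠ [] →
    l.foldl
      (fun (st : List (Int × Int × Int) × Int × Int) (p : Int × Int) =>
        if p.2 ≠ st.2.1 then
          ((if st.2.1 ≠ sil then st.1 ++ [(st.2.1, st.2.2, p.1)] else st.1),
           p.2, p.1)
        else st)
      (pvEmitPairs sil rs.reverse, rs.headI.1, rs.headI.2) =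
    (let rs' := l.foldl
        (fun (rs : List (Int × Int)) (p : Int × Int) =>
          if p.2 ≠ rs.headI.1 then (p.2, p.1) :: rs else rs) rs
     (pvEmitPairs sil rs'.reverse, rs'.headI.1, rs'.headI.2)) := by
  induction l with
  | nil => intro rs h; rfl
  | cons p l ih =>
    intro rs h
    obtain ⟨a, t, rfl⟩ := List.exists_cons_of_ne_nil h
    simp only [List.foldl_cons, List.headI_cons]
    by_cases hp : p.2 = a.1
    · have hc : (p.2 ≠ a.1) = False := by simp [hp]
      simp only [hc, if_false]
      have hI := ih (a :: t) (by simp)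
      simpa only [List.headI_cons] using hI
    · have hc : (p.2 ≠ a.1) = True := by simp [hp]
      simp only [hc, if_true]
      have hlast : ((a :: t).reverse.getLast (by simp)) = a := by
        cases t <;> simp
      have hE := pvEmitPairs_append sil (a :: t).reverse (by simp) (p.2, p.1)
      rw [hlast] at hE
      have hI := ih ((p.2, p.1) :: a :: t) (by simp)
      rw [show ((p.2, p.1) :: a :: t).reverse = (a :: t).reverse ++ [(p.2, p.1)] by simp,
        hE] at hI
      simp only [List.headI_cons] at hI ⊢
      rw [← hI]
      congr 1
      split_ifs <;> simp

-- ===== VERDICT (by name: the statement is the Claim_ definition above) =====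
theorem ali2ctm_spec : Claim_equal_ali2ctm := by
  intro ali sil _ _
  unfold Spec_ali2ctm ali2ctm ali2ctm_alt
  have h := pvFold_inv sil (PySem.List.enumerate ali) [(sil, 0)] (by simp)
  have h0 : pvEmitPairs sil ([(sil, 0)] : List (Int × Int)).reverse = [] := by
    simp [pvEmitPairs]
  rw [h0] at h
  simp only [List.headI_cons] at h
  simp only [h]
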